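-- pv_equiv track=rewrite | github.com/juanestebanalarcon/Coding_challenges_cycle1 | Reto4_/Reto4.py | recorrido_formulaUno
-- ===== SOURCE A (Python) =====
-- def recorrido_formulaUno(num_kilometrosDiaUno,num_dias):
--     recorridoFormulaUno = {}
--     acumulado = num_kilometrosDiaUno
--     recorridoFormulaUno[1] = [num_kilometrosDiaUno,num_kilometrosDiaUno]
--     kms_ = num_kilometrosDiaUno
--     for _ in range(2,num_dias+1,1):
--        dia = _
--        if dia % 3 == 0:
--            kmsRecorridos = (kms_ //2)
--        else:
--             kmsRecorridos = (kms_*2)+10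
--        kms_ = kmsRecorridos
--        acumulado += kms_
--        recorridoFormulaUno[_] = [kms_,acumulado]
--     return recorridoFormulaUno
-- ===== SOURCE B (Python) =====
-- def recorrido_formulaUno(num_kilometrosDiaUno, num_dias):
--     # pass 1: the per-day distance column
--     distancias = [num_kilometrosDiaUno]
--     prev = num_kilometrosDiaUno
--     for dia in range(2, num_dias + 1):
--         prev = prev // 2 if dia % 3 == 0 else prev * 2 + 10
--         distancias.append(prev)
--     # pass 2: the running-total column
--     acumulados = []
--     total = 0
--     for d in distancias:
--         total += d
--         acumulados.append(total)
--     # assemble the table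
--     return {i + 1: [d, a] for i, (d, a) in enumerate(zip(distancias, acumulados))}
-- ===== Notes on version B (the rewrite author's own statement) =====
-- stated objective: alternative
-- what changed: A threads a single loop that updates the dict, the current distance and the accumulator together; B computes the distance column in one pass, the running-total column in a second pass, and assembles the dict from enumerate(zip(...)) at the end.
import Mathlib
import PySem

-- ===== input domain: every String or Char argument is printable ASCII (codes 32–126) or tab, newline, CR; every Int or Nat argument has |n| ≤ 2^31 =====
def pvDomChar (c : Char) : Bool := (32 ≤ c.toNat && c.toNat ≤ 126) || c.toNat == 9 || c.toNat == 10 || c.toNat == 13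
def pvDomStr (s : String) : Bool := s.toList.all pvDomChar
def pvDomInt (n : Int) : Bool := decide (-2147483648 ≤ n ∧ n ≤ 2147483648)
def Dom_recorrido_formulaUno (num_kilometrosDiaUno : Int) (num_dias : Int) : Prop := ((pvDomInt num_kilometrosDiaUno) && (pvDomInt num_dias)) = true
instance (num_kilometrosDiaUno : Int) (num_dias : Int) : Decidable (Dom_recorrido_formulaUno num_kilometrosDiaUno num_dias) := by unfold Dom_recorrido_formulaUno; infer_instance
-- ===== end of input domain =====

-- B splits A's single stateful dict-building loop into a distance pass, a running-sum pass and a zip/enumerate assembly (alternative decomposition, same cost).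


-- ===== PORT A =====
def recorrido_formulaUno (num_kilometrosDiaUno : Int) (num_dias : Int) : List (Int × List Int) :=
  let d0 : PySem.Dict Int (List Int) :=
    PySem.Dict.empty.insert 1 [num_kilometrosDiaUno, num_kilometrosDiaUno]
  let st := (PySem.List.pyRange 2 (num_dias + 1) 1).foldl
    (fun (s : PySem.Dict Int (List Int) × Int × Int) dia =>
      let kmsRecorridos :=
        if PySem.Int.mod dia 3 == 0 then PySem.Int.floordiv s.2.1 2 else s.2.1 * 2 + 10
      (s.1.insert dia [kmsRecorridos, s.2.2 + kmsRecorridos], kmsRecorridos, s.2.2 + kmsRecorridos))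
    (d0, num_kilometrosDiaUno, num_kilometrosDiaUno)
  st.1.items

-- ===== PORT B =====
def recorrido_formulaUno_alt (num_kilometrosDiaUno : Int) (num_dias : Int) : List (Int × List Int) :=
  -- pass 1: the per-day distance column
  let p := (PySem.List.pyRange 2 (num_dias + 1) 1).foldl
    (fun (s : List Int × Int) dia =>
      let prev := if PySem.Int.mod dia 3 == 0 then PySem.Int.floordiv s.2 2 else s.2 * 2 + 10
      (s.1 ++ [prev], prev))
    ([num_kilometrosDiaUno], num_kilometrosDiaUno)
  let distancias := p.1
  -- pass 2: the running-total column
  let ac := distancias.foldl (fun (s : List Int × Int) d => (s.1 ++ [s.2 + d], s.2 + d)) ([], (0 : Int))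
  let acumulados := ac.1
  -- assemble the dict
  ((PySem.List.enumerate (List.zip distancias acumulados) 0).foldl
    (fun (d : PySem.Dict Int (List Int)) q => d.insert (q.1 + 1) [q.2.1, q.2.2])
    PySem.Dict.empty).items

-- ===== PRECONDITION & SPEC =====
def Spec_recorrido_formulaUno (num_kilometrosDiaUno : Int) (num_dias : Int) (out : List (Int × List Int)) : Prop := out = recorrido_formulaUno_alt num_kilometrosDiaUno num_dias
instance (num_kilometrosDiaUno : Int) (num_dias : Int) (out : List (Int × List Int)) : Decidable (Spec_recorrido_formulaUno num_kilometrosDiaUno num_dias out) := by unfold Spec_recorrido_formulaUno; infer_instance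

-- ===== CLAIM (what is proved, stated in full; the proofs are below) =====
def Claim_equal_recorrido_formulaUno : Prop := ∀ (num_kilometrosDiaUno : Int) (num_dias : Int), Dom_recorrido_formulaUno num_kilometrosDiaUno num_dias → Spec_recorrido_formulaUno num_kilometrosDiaUno num_dias (recorrido_formulaUno num_kilometrosDiaUno num_dias)

-- ===== LEMMAS AND PROOFS =====

/-- The common day step: next day's distance from the day number and today's distance. -/
def pvStep (dia kms : Int) : Int :=
  if PySem.Int.mod dia 3 == 0 then PySem.Int.floordiv kms 2 else kms * 2 + 10

/-- Reference table after m extra days: (items so far, current kms, accumulated). -/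
def pvSpec (k : Int) : Nat → List (Int × List Int) × Int × Int
  | 0 => ([(1, [k, k])], k, k)
  | m + 1 =>
    let s := pvSpec k m
    let kr := pvStep (2 + m) s.2.1
    (s.1 ++ [((2 + m : Int), [kr, s.2.2 + kr])], kr, s.2.2 + kr)

/-- Reference distance column after m extra days: (distances so far, current kms). -/
def pvDist (k : Int) : Nat → List Int × Int
  | 0 => ([k], k)
  | m + 1 =>
    let s := pvDist k m
    let kr := pvStep (2 + m) s.2
    (s.1 ++ [kr], kr)

lemma pvSpec_key_lt (k : Int) (m : Nat) : ∀ p ∈ (pvSpec k m).1, p.1 < 2 + (m : Int) := by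
  induction m with
  | zero => intro p hp; simp [pvSpec] at hp; simp [hp]
  | succ m ih =>
    intro p hp
    simp only [pvSpec, List.mem_append, List.mem_singleton] at hp
    rcases hp with hp | hp
    · have := ih p hp; push_cast; linarith
    · subst hp; push_cast; linarith

lemma mk_insert_fresh (L : List (Int × List Int)) (key : Int) (v : List Int)
    (h : ∀ p ∈ L, p.1 ≠ key) :
    (PySem.Dict.mk L).insert key v = PySem.Dict.mk (L ++ [(key, v)]) := by
  have hc : (PySem.Dict.mk L).contains key = false := by
    rw [PySem.Dict.contains_eq_decide_mem_keys]
    simp only [PySem.Dict.keys, decide_eq_false_iff_not, List.mem_map]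
    rintro ⟨p, hp, hk⟩
    exact h p hp hk
  apply PySem.Dict.ext
  rw [PySem.Dict.items_insert_of_not_contains]
  exact hc

lemma pyA_loop (k : Int) (m : Nat) :
    (PySem.List.pyRange 2 (2 + (m : Int)) 1).foldl
      (fun (s : PySem.Dict Int (List Int) × Int × Int) dia =>
        let kmsRecorridos :=
          if PySem.Int.mod dia 3 == 0 then PySem.Int.floordiv s.2.1 2 else s.2.1 * 2 + 10
        (s.1.insert dia [kmsRecorridos, s.2.2 + kmsRecorridos], kmsRecorridos, s.2.2 + kmsRecorridos))
      (PySem.Dict.mk [(1, [k, k])], k, k)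
    = (PySem.Dict.mk (pvSpec k m).1, (pvSpec k m).2.1, (pvSpec k m).2.2) := by
  induction m with
  | zero =>
    rw [PySem.List.pyRange_one_eq_nil (by norm_num)]
    simp [pvSpec]
  | succ m ih =>
    have hc : (2 + ((m + 1 : Nat) : Int)) = (2 + (m : Int)) + 1 := by push_cast; ring
    rw [hc, PySem.List.pyRange_one_succ_right (by omega), List.foldl_append, ih]
    simp only [List.foldl_cons, List.foldl_nil]
    rw [mk_insert_fresh _ _ _ (fun p hp => ne_of_lt (pvSpec_key_lt k m p hp))]
    simp only [pvSpec, pvStep]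

lemma pyB_loop (k : Int) (m : Nat) :
    (PySem.List.pyRange 2 (2 + (m : Int)) 1).foldl
      (fun (s : List Int × Int) dia =>
        let prev := if PySem.Int.mod dia 3 == 0 then PySem.Int.floordiv s.2 2 else s.2 * 2 + 10
        (s.1 ++ [prev], prev))
      ([k], k)
    = pvDist k m := by
  induction m with
  | zero =>
    rw [PySem.List.pyRange_one_eq_nil (by norm_num)]
    simp [pvDist]
  | succ m ih =>
    have hc : (2 + ((m + 1 : Nat) : Int)) = (2 + (m : Int)) + 1 := by push_cast; ring
    rw [hc, PySem.List.pyRange_one_succ_right (by omega), List.foldl_append, ih]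
    simp only [List.foldl_cons, List.foldl_nil]
    simp only [pvDist, pvStep]

lemma pyRange_arg (n : Int) :
    PySem.List.pyRange 2 (n + 1) 1 = PySem.List.pyRange 2 (2 + ((n - 1).toNat : Int)) 1 := by
  rcases lt_or_ge n 1 with h | h
  · rw [PySem.List.pyRange_one_eq_nil (by omega),
        PySem.List.pyRange_one_eq_nil (by omega)]
  · congr 1
    have : ((n - 1).toNat : Int) = n - 1 := Int.toNat_of_nonneg (by omega)
    omega

lemma asm_items (L : List (Int × Int)) :
    ((PySem.List.enumerate L 0).foldl
      (fun (d : PySem.Dict Int (List Int)) q => d.insert (q.1 + 1) [q.2.1, q.2.2])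
      PySem.Dict.empty).items
    = (PySem.List.enumerate L 0).map (fun q => (q.1 + 1, [q.2.1, q.2.2])) := by
  rw [PySem.Dict.items_foldl_insert_fresh]
  · rfl
  · intro a _; exact PySem.Dict.contains_empty _
  · have : (PySem.List.enumerate L 0).map (fun q => q.1 + 1)
        = ((PySem.List.enumerate L 0).map (·.1)).map (fun x => x + 1) := by
      rw [List.map_map]; rfl
    rw [this, PySem.List.map_fst_enumerate]
    exact (PySem.List.nodup_pyRange_one 0 (0 + L.length)).map (fun a b => by omega)

lemma main_inv (k : Int) (m : Nat) :
    (pvDist k m).2 = (pvSpec k m).2.1 ∧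
    ((pvDist k m).1.foldl (fun (s : List Int × Int) d => (s.1 ++ [s.2 + d], s.2 + d)) ([], (0 : Int))).2
      = (pvSpec k m).2.2 ∧
    (pvDist k m).1.length = m + 1 ∧
    ((pvDist k m).1.foldl (fun (s : List Int × Int) d => (s.1 ++ [s.2 + d], s.2 + d)) ([], (0 : Int))).1.length
      = m + 1 ∧
    (PySem.List.enumerate
        (List.zip (pvDist k m).1
          ((pvDist k m).1.foldl (fun (s : List Int × Int) d => (s.1 ++ [s.2 + d], s.2 + d)) ([], (0 : Int))).1)
        0).map (fun q => (q.1 + 1, [q.2.1, q.2.2]))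
      = (pvSpec k m).1 := by
  induction m with
  | zero =>
    refine ⟨rfl, by simp [pvDist, pvSpec], rfl, by simp [pvDist], ?_⟩
    simp [pvDist, pvSpec, PySem.List.enumerate_cons, PySem.List.enumerate_nil, List.zip]
  | succ m ih =>
    obtain ⟨h1, h2, h3, h4, h5⟩ := ih
    have hkr : pvStep (2 + m) (pvDist k m).2 = pvStep (2 + m) (pvSpec k m).2.1 := by rw [h1]
    refine ⟨by simp only [pvDist, pvSpec]; exact hkr, ?_, ?_, ?_, ?_⟩
    · simp only [pvDist, List.foldl_append, List.foldl_cons, List.foldl_nil, pvSpec]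
      rw [h2, hkr]
    · simp only [pvDist, List.length_append, h3, List.length_singleton]
    · simp only [pvDist, List.foldl_append, List.foldl_cons, List.foldl_nil,
        List.length_append, h4, List.length_singleton]
    · simp only [pvDist, List.foldl_append, List.foldl_cons, List.foldl_nil]
      rw [List.zip_append (by rw [h3, h4]), PySem.List.enumerate_append, List.map_append, h5]
      have hlen : (List.zip (pvDist k m).1
          ((pvDist k m).1.foldl (fun (s : List Int × Int) d => (s.1 ++ [s.2 + d], s.2 + d)) ([], (0 : Int))).1).length
          = m + 1 := by rw [List.length_zip, h3, h4]; omega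
      rw [hlen]
      simp only [pvSpec]
      rw [h2, hkr]
      push_cast
      norm_num
      ring

-- ===== VERDICT (by name: the statement is the Claim_ definition above) =====
theorem recorrido_formulaUno_spec : Claim_equal_recorrido_formulaUno := by
  intro k n _
  show recorrido_formulaUno k n = recorrido_formulaUno_alt k n
  have hd0 : (PySem.Dict.empty.insert 1 [k, k] : PySem.Dict Int (List Int))
      = PySem.Dict.mk [(1, [k, k])] := rfl
  simp only [recorrido_formulaUno, recorrido_formulaUno_alt]
  rw [hd0, pyRange_arg, pyA_loop, pyB_loop, asm_items, (main_inv k (n - 1).toNat).2.2.2.2]
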